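-- pv_equiv track=rewrite | github.com/sahilcmd3/DSA-Questions | Leetcode/Daily_Challenge/2528DailyChal.py | check
-- ===== SOURCE A (Python) =====
-- def check(
--     mid: int, df: list[int], k: int, r: int, stations: list[int]
-- ) -> bool:
--     n = len(stations)
--     diff = df[:]
--     curr, cnt = 0, 0
--
--     for i in range(n):
--         curr += diff[i]
--         if curr < mid:
--             need = mid - curr
--             cnt += need
--             if cnt > k:
--                 return False
--
--             curr = mid
--             diff[min(n - 1, i + 2 * r) + 1] -= need
--
--     return True
-- ===== SOURCE B (Python) =====
-- def check(
--     mid: int, df: list[int], k: int, r: int, stations: list[int]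
-- ) -> bool:
--     n = len(stations)
--     # q[t] = df[0] + ... + df[t-1]; bp[t] = total boost injected at positions < t.
--     # A boost injected at j covers positions j..j+2r, so the boost active at i
--     # (excluding i's own) is the prefix-sum difference bp[i] - bp[i - 2r] (clamped).
--     q = [0]
--     bp = [0]
--     for i in range(n):
--         q.append(q[i] + df[i])
--         start = min(i, max(0, i - 2 * r))  # window start, clamped into [0, i]
--         curr = q[i + 1] + bp[i] - bp[start]
--         if curr < mid:
--             need = mid - curr
--             if bp[i] + need > k:
--                 return False
--             bp.append(bp[i] + need)
--         else:
--             bp.append(bp[i])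
--     return True
-- ===== Notes on version B (the rewrite author's own statement) =====
-- stated objective: alternative
-- what changed: B drops A's mutated copy of df entirely: instead of a difference array with a running curr/cnt and decrements written at future indices, B builds two prefix-sum lists (station-power prefix sums q and boost prefix sums bp) and reads the boost still active at position i off as the window difference bp[i] - bp[max(0, i-2r)], so no array cell is ever mutated and no expiry event is ever replayed.
-- outside the precondition, e.g. on check(2, [0, 1, 0], 3, -1, [0, 0, 0]): A returns True, B returns False; on check(1, [0, 0, 0], 5, 1, [0, 0, 0]): A raises IndexError, B returns True
import Mathlib
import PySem

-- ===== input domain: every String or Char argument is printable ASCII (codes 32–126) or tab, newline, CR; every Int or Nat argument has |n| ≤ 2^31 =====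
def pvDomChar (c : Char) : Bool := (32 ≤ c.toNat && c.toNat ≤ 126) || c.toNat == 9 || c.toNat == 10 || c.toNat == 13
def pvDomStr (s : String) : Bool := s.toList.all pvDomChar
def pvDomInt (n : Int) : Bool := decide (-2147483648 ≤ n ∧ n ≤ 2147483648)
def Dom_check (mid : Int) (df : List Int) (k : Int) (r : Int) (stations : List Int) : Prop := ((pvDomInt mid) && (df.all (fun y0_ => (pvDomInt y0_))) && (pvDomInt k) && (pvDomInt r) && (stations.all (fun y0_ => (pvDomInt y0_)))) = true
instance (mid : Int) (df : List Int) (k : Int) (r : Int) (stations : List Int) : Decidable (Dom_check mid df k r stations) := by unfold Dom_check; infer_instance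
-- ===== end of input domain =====

-- B replaces A's mutated difference-array copy of df (running curr/cnt with scheduled
-- decrements at future indices) by two prefix-sum arrays: station-power prefix sums and
-- boost prefix sums, with the active boost read off as a window difference (objective: alternative).

-- ===== PORT A =====
-- the 'for i in range(n)' loop of A, with the mutable diff/curr/cnt state;
-- fuel counts the remaining iterations (started at n, so fuel = n - i throughout)
def checkLoopA (mid : Int) (k : Int) (r : Int) (n : Nat) :
    Nat → Nat → List Int → Int → Int → Bool
  | 0, _, _, _, _ => true
  | fuel + 1, i, diff, curr, cnt =>
    let curr := curr + PySem.List.pyGetD diff (i : Int) 0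
    if curr < mid then
      let need := mid - curr
      let cnt := cnt + need
      if cnt > k then false
      else
        let idx := min ((n : Int) - 1) ((i : Int) + 2 * r) + 1
        -- diff[idx] -= need
        let diff := PySem.List.pySetD diff idx (PySem.List.pyGetD diff idx 0 - need)
        checkLoopA mid k r n fuel (i + 1) diff mid cnt
    else checkLoopA mid k r n fuel (i + 1) diff curr cnt

def check (mid : Int) (df : List Int) (k : Int) (r : Int) (stations : List Int) : Bool :=
  let n := stations.length
  let diff := df        -- diff = df[:] (Lean lists are immutable, the copy is implicit)
  checkLoopA mid k r n n 0 diff 0 0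

-- ===== PORT B =====
-- the 'for i in range(n)' loop of B, carrying the two prefix-sum lists q and bp;
-- fuel counts the remaining iterations (started at n, so fuel = n - i throughout)
def checkLoopB (mid : Int) (k : Int) (r : Int) (df : List Int) :
    Nat → Nat → List Int → List Int → Bool
  | 0, _, _, _ => true
  | fuel + 1, i, q, bp =>
    -- q.append(q[i] + df[i])
    let q := q ++ [PySem.List.pyGetD q (i : Int) 0 + PySem.List.pyGetD df (i : Int) 0]
    -- start = min(i, max(0, i - 2*r))
    let start := min (i : Int) (max 0 ((i : Int) - 2 * r))
    -- curr = q[i+1] + bp[i] - bp[start]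
    let curr := PySem.List.pyGetD q ((i : Int) + 1) 0 + PySem.List.pyGetD bp (i : Int) 0 -
      PySem.List.pyGetD bp start 0
    if curr < mid then
      let need := mid - curr
      if PySem.List.pyGetD bp (i : Int) 0 + need > k then false
      else checkLoopB mid k r df fuel (i + 1) q (bp ++ [PySem.List.pyGetD bp (i : Int) 0 + need])
    else checkLoopB mid k r df fuel (i + 1) q (bp ++ [PySem.List.pyGetD bp (i : Int) 0])

def check_alt (mid : Int) (df : List Int) (k : Int) (r : Int) (stations : List Int) : Bool :=
  let n := stations.length
  checkLoopB mid k r df n 0 [0] [0]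

-- ===== PRECONDITION & SPEC =====
-- presum df i = sum of the first i entries of df (the running power before station i,
-- as long as no range addition has been applied)
def presum (df : List Int) (i : Nat) : Int := (df.take i).sum

-- Pre_ admits the natural domain of the LeetCode helper — radius r ≥ 0 with df one entry
-- longer than stations (A's difference array needs index n) — plus the inputs whose answer
-- is decided before any range addition is applied: an empty stations list, a running sum
-- that never dips below mid (answer True), or a first dip whose deficit already exceeds k
-- (answer False).  Excluded but returning: r < 0 (A's difference-array write wraps to a
-- negative index, an artefact) and shorter df on which A happens not to write index n
-- (it raises IndexError whenever it does).
def Pre_check (mid : Int) (df : List Int) (k : Int) (r : Int) (stations : List Int) : Prop :=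
  stations = [] ∨ (0 ≤ r ∧ stations.length + 1 ≤ df.length) ∨
    (∃ j, j < stations.length ∧ j < df.length ∧
      (∀ l, l < j → mid ≤ presum df (l + 1)) ∧
      presum df (j + 1) < mid ∧ mid - presum df (j + 1) > k) ∨
    (stations.length ≤ df.length ∧ ∀ j, j < stations.length → mid ≤ presum df (j + 1))
instance (mid : Int) (df : List Int) (k : Int) (r : Int) (stations : List Int) : Decidable (Pre_check mid df k r stations) := by unfold Pre_check; infer_instance

def pvWitness_check : Int × List Int × Int × Int × List Int := (1, [0, 2, 0], 1, 1, [10, 20])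

def Spec_check (mid : Int) (df : List Int) (k : Int) (r : Int) (stations : List Int) (out : Bool) : Prop := out = check_alt mid df k r stations
instance (mid : Int) (df : List Int) (k : Int) (r : Int) (stations : List Int) (out : Bool) : Decidable (Spec_check mid df k r stations out) := by unfold Spec_check; infer_instance

-- ===== CLAIM (what is proved, stated in full; the proofs are below) =====
def Claim_equal_check : Prop := ∀ (mid : Int) (df : List Int) (k : Int) (r : Int) (stations : List Int), Dom_check mid df k r stations → Pre_check mid df k r stations → Spec_check mid df k r stations (check mid df k r stations)

-- ===== LEMMAS AND PROOFS =====

-- Ex bp W t: the boost amount whose coverage expires at position t, read off the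
-- boost-prefix-sum list bp (the boost injected at position t - W, if recorded in bp)
def Ex (bp : List Int) (W : Nat) (t : Nat) : Int :=
  if W ≤ t ∧ t - W + 1 < bp.length then bp.getD (t - W + 1) 0 - bp.getD (t - W) 0 else 0

theorem getD_concat_length (l : List Int) (x d : Int) : (l ++ [x]).getD l.length d = x := by
  simp [List.getD_eq_getElem?_getD]

theorem getD_concat_lt (l : List Int) (x d : Int) (t : Nat) (h : t < l.length) :
    (l ++ [x]).getD t d = l.getD t d := by
  simp [List.getD_eq_getElem?_getD, List.getElem?_append_left h]

theorem pyGetD_nonneg_toNat (l : List Int) (x d : Int) (h : 0 ≤ x) :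
    PySem.List.pyGetD l x d = l.getD x.toNat d := by
  have hx : x = ((x.toNat : Nat) : Int) := (Int.toNat_of_nonneg h).symm
  conv_lhs => rw [hx]
  rw [PySem.List.pyGetD_natCast]

theorem pyGetD_replicate_zero (m : Nat) (x : Int) :
    PySem.List.pyGetD (List.replicate m (0 : Int)) x 0 = 0 := by
  unfold PySem.List.pyGetD
  cases h : PySem.List.pyGet? (List.replicate m (0 : Int)) x with
  | none => rfl
  | some v =>
      have hv := PySem.List.mem_of_pyGet?_eq_some (xs := List.replicate m (0 : Int)) (i := x) (x := v) h
      simp [List.eq_of_mem_replicate hv]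

-- one unfolding of A's loop when i < n, with the lets substituted
theorem loopA_step (mid k r : Int) (n : Nat) (d i : Nat) (diff : List Int) (curr cnt : Int) :
    checkLoopA mid k r n (d + 1) i diff curr cnt =
      (if curr + PySem.List.pyGetD diff (i : Int) 0 < mid then
        if cnt + (mid - (curr + PySem.List.pyGetD diff (i : Int) 0)) > k then false
        else checkLoopA mid k r n d (i + 1)
          (PySem.List.pySetD diff (min ((n : Int) - 1) ((i : Int) + 2 * r) + 1)
            (PySem.List.pyGetD diff (min ((n : Int) - 1) ((i : Int) + 2 * r) + 1) 0 -
              (mid - (curr + PySem.List.pyGetD diff (i : Int) 0))))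
          mid (cnt + (mid - (curr + PySem.List.pyGetD diff (i : Int) 0)))
      else checkLoopA mid k r n d (i + 1) diff (curr + PySem.List.pyGetD diff (i : Int) 0) cnt) :=
  rfl

-- one unfolding of B's loop when i < n, with the lets substituted
theorem loopB_step (mid k r : Int) (df : List Int) (d i : Nat) (q bp : List Int) :
    checkLoopB mid k r df (d + 1) i q bp =
      (if PySem.List.pyGetD (q ++ [PySem.List.pyGetD q (i : Int) 0 + PySem.List.pyGetD df (i : Int) 0]) ((i : Int) + 1) 0 +
          PySem.List.pyGetD bp (i : Int) 0 -
          PySem.List.pyGetD bp (min (i : Int) (max 0 ((i : Int) - 2 * r))) 0 < mid then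
        if PySem.List.pyGetD bp (i : Int) 0 +
            (mid - (PySem.List.pyGetD (q ++ [PySem.List.pyGetD q (i : Int) 0 + PySem.List.pyGetD df (i : Int) 0]) ((i : Int) + 1) 0 +
              PySem.List.pyGetD bp (i : Int) 0 -
              PySem.List.pyGetD bp (min (i : Int) (max 0 ((i : Int) - 2 * r))) 0)) > k then false
        else checkLoopB mid k r df d (i + 1)
          (q ++ [PySem.List.pyGetD q (i : Int) 0 + PySem.List.pyGetD df (i : Int) 0])
          (bp ++ [PySem.List.pyGetD bp (i : Int) 0 +
            (mid - (PySem.List.pyGetD (q ++ [PySem.List.pyGetD q (i : Int) 0 + PySem.List.pyGetD df (i : Int) 0]) ((i : Int) + 1) 0 +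
              PySem.List.pyGetD bp (i : Int) 0 -
              PySem.List.pyGetD bp (min (i : Int) (max 0 ((i : Int) - 2 * r))) 0))])
      else checkLoopB mid k r df d (i + 1)
        (q ++ [PySem.List.pyGetD q (i : Int) 0 + PySem.List.pyGetD df (i : Int) 0])
        (bp ++ [PySem.List.pyGetD bp (i : Int) 0])) :=
  rfl

theorem presum_succ (df : List Int) (i : Nat) (h : i < df.length) :
    presum df (i + 1) = presum df i + df.getD i 0 := by
  rw [presum, presum, List.take_add_one, List.sum_append]
  simp [List.getElem?_eq_getElem h, List.getD_eq_getElem?_getD]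

theorem loopA_true (mid k r : Int) (n : Nat) (df : List Int) :
    ∀ (d i : Nat) (cnt : Int), n - i = d →
    (∀ j, i ≤ j → j < n → j < df.length ∧ mid ≤ presum df (j + 1)) →
    checkLoopA mid k r n d i df (presum df i) cnt = true := by
  intro d
  induction d with
  | zero =>
      intro i cnt _ _
      rfl
  | succ d ih =>
      intro i cnt hd H
      have hin : i < n := by omega
      obtain ⟨him, hge⟩ := H i le_rfl hin
      rw [loopA_step mid k r n d i df (presum df i) cnt]
      have hcurr : presum df i + PySem.List.pyGetD df (i : Int) 0 = presum df (i + 1) := by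
        rw [PySem.List.pyGetD_natCast, ← presum_succ df i him]
      rw [hcurr, if_neg (by omega)]
      exact ih (i + 1) cnt (by omega) (fun j hj hjn => H j (by omega) hjn)

theorem loopA_false (mid k r : Int) (n : Nat) (df : List Int) (js : Nat)
    (hjn : js < n) (hjm : js < df.length)
    (hdip : presum df (js + 1) < mid) (hfail : mid - presum df (js + 1) > k) :
    ∀ (d i : Nat), n - i = d → i ≤ js →
    (∀ l, i ≤ l → l < js → mid ≤ presum df (l + 1)) →
    checkLoopA mid k r n d i df (presum df i) 0 = false := by
  intro d
  induction d with
  | zero =>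
      intro i hd hij _
      exact absurd hjn (by omega)
  | succ d ih =>
      intro i hd hij H
      have hin : i < n := by omega
      have him : i < df.length := by omega
      rw [loopA_step mid k r n d i df (presum df i) 0]
      have hcurr : presum df i + PySem.List.pyGetD df (i : Int) 0 = presum df (i + 1) := by
        rw [PySem.List.pyGetD_natCast, ← presum_succ df i him]
      rw [hcurr]
      by_cases hi : i = js
      · subst hi
        rw [if_pos hdip, if_pos (by omega)]
      · rw [if_neg (by have := H i le_rfl (by omega); omega)]
        exact ih (i + 1) (by omega) (by omega) (fun l hl hls => H l (by omega) hls)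

-- appending to bp changes Ex only at the single position i + W
theorem Ex_concat (bp : List Int) (x : Int) (W t i : Nat) (hbplen : bp.length = i + 1)
    (ht : t ≠ i + W) : Ex (bp ++ [x]) W t = Ex bp W t := by
  unfold Ex
  by_cases h1 : W ≤ t ∧ t - W + 1 < bp.length
  · rw [if_pos ⟨h1.1, by simp only [List.length_append, List.length_cons, List.length_nil]; omega⟩,
      if_pos h1]
    rw [getD_concat_lt _ _ _ _ (by omega), getD_concat_lt _ _ _ _ (by omega)]
  · rw [if_neg h1, if_neg ?_]
    intro hc
    simp only [List.length_append, List.length_cons, List.length_nil] at hc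
    exact h1 ⟨hc.1, by omega⟩

theorem Ex_concat_at (bp : List Int) (x : Int) (W i : Nat) (hbplen : bp.length = i + 1)
    (hW : 1 ≤ W) : Ex (bp ++ [x]) W (i + W) = x - bp.getD i 0 := by
  unfold Ex
  rw [if_pos ⟨by omega, by simp only [List.length_append, List.length_cons, List.length_nil]; omega⟩]
  have h1 : i + W - W + 1 = i + 1 := by omega
  have h2 : i + W - W = i := by omega
  rw [h1, h2, ← hbplen, getD_concat_length, getD_concat_lt _ _ _ _ (by omega)]

-- Ex at a position whose injection index is not yet recorded is 0
theorem Ex_last_zero (bp : List Int) (W i : Nat) (hbplen : bp.length = i + 1) :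
    Ex bp W (i + W) = 0 := by
  unfold Ex
  rw [if_neg]
  intro hc
  omega

-- the telescoping step: yesterday's window lower bound plus the expiring boost
-- equals today's window lower bound
theorem Ex_telescope (bp : List Int) (W i : Nat) (hbplen : bp.length = i + 1) (hW : 1 ≤ W) :
    bp.getD (i - W) 0 + Ex bp W i = bp.getD (i + 1 - W) 0 := by
  unfold Ex
  by_cases hWi : W ≤ i
  · rw [if_pos ⟨hWi, by omega⟩]
    have h1 : i + 1 - W = i - W + 1 := by omega
    rw [h1]
    ring
  · rw [if_neg (by intro hc; exact hWi hc.1)]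
    have h1 : i - W = 0 := by omega
    have h2 : i + 1 - W = 0 := by omega
    rw [h1, h2]
    ring

-- main loop equivalence on the natural domain (r ≥ 0, df one longer than stations)
theorem loop_eq (mid k r : Int) (df : List Int) (n : Nat) (hr : 0 ≤ r)
    (hn : n + 1 ≤ df.length) :
    ∀ (d i : Nat) (diff : List Int) (currA cnt : Int) (q bp : List Int),
    n - i = d →
    diff.length = df.length →
    q.length = i + 1 →
    (∀ t, t ≤ i → q.getD t 0 = presum df t) →
    bp.length = i + 1 →
    cnt = bp.getD i 0 →
    currA = presum df i + bp.getD i 0 - bp.getD (i - (2 * r.toNat + 1)) 0 →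
    (∀ t, i ≤ t → t < n →
      PySem.List.pyGetD diff (t : Int) 0 =
        PySem.List.pyGetD df (t : Int) 0 - Ex bp (2 * r.toNat + 1) t) →
    checkLoopA mid k r n d i diff currA cnt = checkLoopB mid k r df d i q bp := by
  intro d
  induction d with
  | zero =>
      intro i diff currA cnt q bp _ _ _ _ _ _ _ _
      rfl
  | succ d ih =>
      intro i diff currA cnt q bp hd hdlen hqlen hq hbplen hcnt hcurr hdiff
      have hin : i < n := by omega
      have him : i < df.length := by omega
      have hW1 : 1 ≤ 2 * r.toNat + 1 := by omega
      rw [loopA_step mid k r n d i diff currA cnt, loopB_step mid k r df d i q bp]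
      simp only [PySem.List.pyGetD_natCast]
      have hv : q.getD i 0 + df.getD i 0 = presum df (i + 1) := by
        rw [hq i le_rfl, ← presum_succ df i him]
      have hq1 : PySem.List.pyGetD (q ++ [q.getD i 0 + df.getD i 0]) ((i : Int) + 1) 0 =
          presum df (i + 1) := by
        have hcast : ((i : Int) + 1) = (((i + 1 : Nat)) : Int) := by push_cast; ring
        rw [hcast, PySem.List.pyGetD_natCast]
        have hcc := getD_concat_length q (q.getD i 0 + df.getD i 0) 0
        rw [hqlen] at hcc
        rw [hcc, hv]
      have hstart : PySem.List.pyGetD bp (min (i : Int) (max 0 ((i : Int) - 2 * r))) 0 =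
          bp.getD (i + 1 - (2 * r.toNat + 1)) 0 := by
        have h0 : (0 : Int) ≤ min (i : Int) (max 0 ((i : Int) - 2 * r)) := by omega
        rw [pyGetD_nonneg_toNat _ _ _ h0]
        congr 1
        omega
      have hdi := hdiff i le_rfl hin
      simp only [PySem.List.pyGetD_natCast] at hdi
      have hkey := Ex_telescope bp (2 * r.toNat + 1) i hbplen hW1
      have hps := presum_succ df i him
      have hcA : currA + diff.getD i 0 =
          presum df (i + 1) + bp.getD i 0 - bp.getD (i + 1 - (2 * r.toNat + 1)) 0 := by
        rw [hdi, hcurr]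
        omega
      simp only [hq1, hstart, hcA, hcnt]
      set cB := presum df (i + 1) + bp.getD i 0 - bp.getD (i + 1 - (2 * r.toNat + 1)) 0 with hcB
      -- the q-list invariant carries over to the appended list
      have hq' : ∀ t, t ≤ i + 1 → (q ++ [q.getD i 0 + df.getD i 0]).getD t 0 = presum df t := by
        intro t ht
        by_cases h : t ≤ i
        · rw [getD_concat_lt _ _ _ t (by omega)]
          exact hq t h
        · have ht' : t = i + 1 := by omega
          subst ht'
          have hcc := getD_concat_length q (q.getD i 0 + df.getD i 0) 0
          rw [hqlen] at hcc
          rw [hcc, hv]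
      by_cases hlt : cB < mid
      · rw [if_pos hlt, if_pos hlt]
        by_cases hk : bp.getD i 0 + (mid - cB) > k
        · rw [if_pos hk, if_pos hk]
        · rw [if_neg hk, if_neg hk]
          set need := mid - cB with hneed
          set e := min ((n : Int) - 1) ((i : Int) + 2 * r) + 1 with he
          have hbcc := getD_concat_length bp (bp.getD i 0 + need) 0
          rw [hbplen] at hbcc
          have he0 : (0 : Int) ≤ e := by rw [he]; omega
          have heN : e ≤ (n : Int) := by rw [he]; omega
          have helen : e.toNat < diff.length := by rw [hdlen]; omega
          apply ih (i + 1) _ mid (bp.getD i 0 + need) _ (bp ++ [bp.getD i 0 + need]) (by omega)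
          · rw [PySem.List.length_pySetD]
            exact hdlen
          · simp [hqlen]
          · exact hq'
          · simp [hbplen]
          · rw [hbcc]
          · rw [hbcc, getD_concat_lt _ _ _ _ (by omega)]
            rw [hcB] at hneed
            omega
          · intro t ht1 ht2
            have hsetget : ∀ (w : Int), PySem.List.pyGetD (PySem.List.pySetD diff e w) (t : Int) 0 =
                if t = e.toNat then w else PySem.List.pyGetD diff (t : Int) 0 := by
              intro w
              have hee : e = ((e.toNat : Nat) : Int) := (Int.toNat_of_nonneg he0).symm
              conv_lhs => rw [hee]
              rw [PySem.List.pyGetD_pySetD_natCast _ _ _ _ _ helen]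
            rw [hsetget]
            by_cases htW : t = i + (2 * r.toNat + 1)
            · have het : t = e.toNat := by rw [he] at he0 heN ⊢; omega
              rw [if_pos het]
              have hee : e = (t : Int) := by rw [he]; omega
              have hdit : PySem.List.pyGetD diff e 0 =
                  PySem.List.pyGetD df (t : Int) 0 - Ex bp (2 * r.toNat + 1) t := by
                rw [hee]
                exact hdiff t (by omega) ht2
              rw [hdit]
              have hEx0 : Ex bp (2 * r.toNat + 1) t = 0 := by
                rw [htW]
                exact Ex_last_zero bp _ i hbplen
              have hExA : Ex (bp ++ [bp.getD i 0 + need]) (2 * r.toNat + 1) t = need := by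
                rw [htW, Ex_concat_at bp _ _ i hbplen hW1]
                ring
              rw [hEx0, hExA]
              ring
            · rw [if_neg (by rw [he]; omega)]
              rw [hdiff t (by omega) ht2, Ex_concat bp _ _ t i hbplen htW]
      · rw [if_neg hlt, if_neg hlt]
        have hbcc := getD_concat_length bp (bp.getD i 0) 0
        rw [hbplen] at hbcc
        apply ih (i + 1) diff cB (bp.getD i 0) _ (bp ++ [bp.getD i 0]) (by omega) hdlen
          (by simp [hqlen]) hq' (by simp [hbplen])
        · rw [hbcc]
        · rw [hbcc, getD_concat_lt _ _ _ _ (by omega), hcB]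
        · intro t ht1 ht2
          have hEx : Ex (bp ++ [bp.getD i 0]) (2 * r.toNat + 1) t = Ex bp (2 * r.toNat + 1) t := by
            by_cases htW : t = i + (2 * r.toNat + 1)
            · rw [htW, Ex_concat_at bp _ _ i hbplen hW1, Ex_last_zero bp _ i hbplen]
              ring
            · exact Ex_concat bp _ _ t i hbplen htW
          rw [hdiff t (by omega) ht2, hEx]

-- B's loop while no boost has ever been injected (bp all zeros): curr is the plain prefix sum
theorem loopB_true (mid k r : Int) (n : Nat) (df : List Int) :
    ∀ (d i : Nat) (q : List Int), n - i = d →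
    q.length = i + 1 →
    (∀ t, t ≤ i → q.getD t 0 = presum df t) →
    (∀ j, i ≤ j → j < n → j < df.length ∧ mid ≤ presum df (j + 1)) →
    checkLoopB mid k r df d i q (List.replicate (i + 1) 0) = true := by
  intro d
  induction d with
  | zero =>
      intro i q _ _ _ _
      rfl
  | succ d ih =>
      intro i q hd hlen hq H
      have hin : i < n := by omega
      obtain ⟨him, hge⟩ := H i le_rfl hin
      rw [loopB_step mid k r df d i q _]
      have hv : PySem.List.pyGetD q (i : Int) 0 + PySem.List.pyGetD df (i : Int) 0 =
          presum df (i + 1) := by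
        simp only [PySem.List.pyGetD_natCast]
        rw [hq i le_rfl, ← presum_succ df i him]
      have hq1 : PySem.List.pyGetD
          (q ++ [PySem.List.pyGetD q (i : Int) 0 + PySem.List.pyGetD df (i : Int) 0])
          ((i : Int) + 1) 0 = presum df (i + 1) := by
        have hcast : ((i : Int) + 1) = (((i + 1 : Nat)) : Int) := by push_cast; ring
        rw [hcast, PySem.List.pyGetD_natCast]
        have hcc := getD_concat_length q (PySem.List.pyGetD q (i : Int) 0 +
          PySem.List.pyGetD df (i : Int) 0) 0
        rw [hlen] at hcc
        rw [hcc, hv]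
      simp only [hq1, pyGetD_replicate_zero]
      rw [if_neg (by omega)]
      have hrep : List.replicate (i + 1) (0 : Int) ++ [(0 : Int)] = List.replicate (i + 2) 0 :=
        (List.replicate_succ' (n := i + 1) (a := (0:Int))).symm
      rw [hrep]
      apply ih (i + 1) _ (by omega) (by simp [hlen])
      · intro t ht
        by_cases h : t ≤ i
        · rw [getD_concat_lt _ _ _ t (by omega)]
          exact hq t h
        · have ht' : t = i + 1 := by omega
          subst ht'
          have hcc := getD_concat_length q (PySem.List.pyGetD q (i : Int) 0 +
            PySem.List.pyGetD df (i : Int) 0) 0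
          rw [hlen] at hcc
          rw [hcc, hv]
      · exact fun j hj hjn => H j (by omega) hjn

theorem loopB_false (mid k r : Int) (n : Nat) (df : List Int) (js : Nat)
    (hjn : js < n) (hjm : js < df.length)
    (hdip : presum df (js + 1) < mid) (hfail : mid - presum df (js + 1) > k) :
    ∀ (d i : Nat) (q : List Int), n - i = d → i ≤ js →
    q.length = i + 1 →
    (∀ t, t ≤ i → q.getD t 0 = presum df t) →
    (∀ l, i ≤ l → l < js → mid ≤ presum df (l + 1)) →
    checkLoopB mid k r df d i q (List.replicate (i + 1) 0) = false := by
  intro d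
  induction d with
  | zero =>
      intro i q hd hij _ _ _
      exact absurd hjn (by omega)
  | succ d ih =>
      intro i q hd hij hlen hq H
      have hin : i < n := by omega
      have him : i < df.length := by omega
      rw [loopB_step mid k r df d i q _]
      have hv : PySem.List.pyGetD q (i : Int) 0 + PySem.List.pyGetD df (i : Int) 0 =
          presum df (i + 1) := by
        simp only [PySem.List.pyGetD_natCast]
        rw [hq i le_rfl, ← presum_succ df i him]
      have hq1 : PySem.List.pyGetD
          (q ++ [PySem.List.pyGetD q (i : Int) 0 + PySem.List.pyGetD df (i : Int) 0])
          ((i : Int) + 1) 0 = presum df (i + 1) := by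
        have hcast : ((i : Int) + 1) = (((i + 1 : Nat)) : Int) := by push_cast; ring
        rw [hcast, PySem.List.pyGetD_natCast]
        have hcc := getD_concat_length q (PySem.List.pyGetD q (i : Int) 0 +
          PySem.List.pyGetD df (i : Int) 0) 0
        rw [hlen] at hcc
        rw [hcc, hv]
      simp only [hq1, pyGetD_replicate_zero]
      by_cases hi : i = js
      · subst hi
        rw [if_pos (by omega), if_pos (by omega)]
      · rw [if_neg (by have := H i le_rfl (by omega); omega)]
        have hrep : List.replicate (i + 1) (0 : Int) ++ [(0 : Int)] = List.replicate (i + 2) 0 :=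
          (List.replicate_succ' (n := i + 1) (a := (0:Int))).symm
        rw [hrep]
        apply ih (i + 1) _ (by omega) (by omega) (by simp [hlen])
        · intro t ht
          by_cases h : t ≤ i
          · rw [getD_concat_lt _ _ _ t (by omega)]
            exact hq t h
          · have ht' : t = i + 1 := by omega
            subst ht'
            rw [← hlen, getD_concat_length, hv, hlen]
        · exact fun l hl hls => H l (by omega) hls

-- ===== VERDICT (by name: the statement is the Claim_ definition above) =====
theorem check_spec : Claim_equal_check := by
  intro mid df k r stations _hdom hpre
  unfold Spec_check check check_alt
  rcases hpre with h0 | ⟨hr, hn⟩ | ⟨js, hjn, hjm, Hbefore, hdip, hfail⟩ | ⟨hnm, Hge⟩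
  · subst h0
    rfl
  · exact loop_eq mid k r df stations.length hr hn stations.length 0 df 0 0 [0] [0]
      (by omega) rfl
      rfl (by intro t ht; interval_cases t <;> simp [presum]) rfl rfl
      (by simp [presum])
      (by intro t _ _; simp [Ex])
  · have ha := loopA_false mid k r stations.length df js hjn hjm hdip hfail
      stations.length 0 rfl (by omega) (fun l _ hls => Hbefore l hls)
    have hb := loopB_false mid k r stations.length df js hjn hjm hdip hfail
      stations.length 0 [0] rfl (by omega) rfl
      (by intro t ht; interval_cases t <;> simp [presum])
      (fun l _ hls => Hbefore l hls)
    have h0 : presum df 0 = 0 := by simp [presum]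
    rw [← h0] at ha ⊢
    rw [ha]
    exact hb.symm
  · have ha := loopA_true mid k r stations.length df stations.length 0 0 rfl
      (fun j _ hjn => ⟨by omega, Hge j hjn⟩)
    have hb := loopB_true mid k r stations.length df stations.length 0 [0] rfl rfl
      (by intro t ht; interval_cases t <;> simp [presum])
      (fun j _ hjn => ⟨by omega, Hge j hjn⟩)
    have h0 : presum df 0 = 0 := by simp [presum]
    rw [← h0] at ha ⊢
    rw [ha]
    exact hb.symm
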